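-- pv_equiv track=rewrite | github.com/IAmBgWithCid/kobo-xray-plugin | ner.py | co_occurrence_relation
-- ===== SOURCE A (Python) =====
-- def co_occurrence_relation(entity_map: dict, chapters: dict) -> dict:
--     co_occurrence_relations = {}
--     for chapter_num, (filename, text) in enumerate(chapters.items(), start=1):
--         doc = text.split("\n")
--         for paragraph in doc:
--             for entity_key in entity_map.keys():
--                 if entity_key in paragraph.lower():
--                     for other_key in entity_map.keys():
--                         if other_key != entity_key and other_key in paragraph.lower():
--                             pair = tuple(sorted([entity_key, other_key]))
--                             co_occurrence_relations[pair] = co_occurrence_relations.get(pair, 0) + 1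
--
--     #only keep pairs that co-occur more than once and add them as aliases to each other
--     for pair, count in co_occurrence_relations.items():
--         if count > 1:  # Only keep pairs that co-occur more than once
--             if pair[1] not in entity_map[pair[0]]["aliases"]:
--                 entity_map[pair[0]]["aliases"].append(pair[1])
--             if pair[0] not in entity_map[pair[1]]["aliases"]:
--                 entity_map[pair[1]]["aliases"].append(pair[0])
--
--     return entity_map
-- ===== SOURCE B (Python) =====
-- def co_occurrence_relation(entity_map: dict, chapters: dict) -> dict:
--     keys = list(entity_map.keys())
--     seen = {}
--     for text in chapters.values():
--         for paragraph in text.split("\n"):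
--             low = paragraph.lower()
--             present = [k for k in keys if k in low]
--             for x in present:
--                 for y in present:
--                     if y != x:
--                         pair = (x, y) if x < y else (y, x)
--                         seen[pair] = True
--     for a, b in seen:
--         for u, v in ((a, b), (b, a)):
--             aliases = entity_map[u]["aliases"]
--             if v not in aliases:
--                 aliases.append(v)
--     return entity_map
-- ===== Notes on version B (the rewrite author's own statement) =====
-- stated objective: faster
-- what changed: B lowercases each paragraph once and builds its present-entity list once, then marks each co-occurring pair in a seen-dict (A's 'count > 1' filter is vacuous because A counts every unordered pair twice per paragraph, once in each direction), instead of A's E*E key rescans with repeated paragraph.lower() calls and a count dict.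
import Mathlib
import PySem

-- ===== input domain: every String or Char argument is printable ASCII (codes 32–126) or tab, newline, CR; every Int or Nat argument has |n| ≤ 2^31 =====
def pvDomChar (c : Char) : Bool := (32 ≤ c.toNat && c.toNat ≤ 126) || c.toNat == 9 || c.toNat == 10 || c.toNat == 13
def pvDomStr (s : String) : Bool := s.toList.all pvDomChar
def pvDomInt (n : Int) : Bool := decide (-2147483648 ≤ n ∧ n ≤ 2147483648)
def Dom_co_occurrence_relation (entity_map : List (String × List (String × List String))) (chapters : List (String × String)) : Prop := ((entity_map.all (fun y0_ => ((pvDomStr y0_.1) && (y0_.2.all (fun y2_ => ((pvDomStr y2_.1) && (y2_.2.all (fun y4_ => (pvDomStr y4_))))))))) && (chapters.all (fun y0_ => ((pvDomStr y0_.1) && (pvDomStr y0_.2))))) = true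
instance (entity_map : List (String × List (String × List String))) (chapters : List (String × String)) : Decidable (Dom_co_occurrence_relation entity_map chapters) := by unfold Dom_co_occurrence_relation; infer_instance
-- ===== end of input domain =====

-- B computes each paragraph's present-entity list once (lowercasing once per paragraph) and marks co-occurring
-- pairs in a seen-dict instead of A's per-key rescans with a count dict; same return value, and B performs the
-- same in-place alias mutation of entity_map as A does in Python.


-- ===== PORT A =====
-- tuple(sorted([x, y])) on a two-element list of strings
def pyPairSorted (x y : String) : String × String :=
  match PySem.List.sorted [x, y] (fun s => s) false with
  | [a, b] => (a, b)
  | _ => (x, y)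

-- 'if v not in entity_map[k]["aliases"]: entity_map[k]["aliases"].append(v)' — dict update on the
-- association list (under Pre_ keys are unique, so updating every matching entry is the dict update)
def coA_addAlias (em : List (String × List (String × List String))) (k v : String) :
    List (String × List (String × List String)) :=
  em.map (fun e =>
    if e.1 = k then
      (e.1, e.2.map (fun f =>
        if f.1 = "aliases" then (f.1, if v ∈ f.2 then f.2 else f.2 ++ [v]) else f))
    else e)

def co_occurrence_relation (entity_map : List (String × List (String × List String))) (chapters : List (String × String)) : List (String × List (String × List String)) :=
  let keys := entity_map.map (fun e => e.1)
  let counts : PySem.Dict (String × String) Int :=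
    chapters.foldl (fun d c =>
      ((PySem.Str.split? c.2 "\n").getD []).foldl (fun d paragraph =>
        keys.foldl (fun d entity_key =>
          if PySem.Str.isIn entity_key (PySem.Str.lower paragraph) = true then
            keys.foldl (fun d other_key =>
              if other_key ≠ entity_key ∧ PySem.Str.isIn other_key (PySem.Str.lower paragraph) = true then
                let pair := pyPairSorted entity_key other_key
                d.insert pair (d.getD pair 0 + 1)
              else d) d
          else d) d) d) PySem.Dict.empty
  counts.items.foldl (fun em pc =>
    if pc.2 > 1 then coA_addAlias (coA_addAlias em pc.1.1 pc.1.2) pc.1.2 pc.1.1 else em) entity_map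

-- ===== PORT B =====
-- pair = (x, y) if x < y else (y, x)
def coB_pair (x y : String) : String × String := if x < y then (x, y) else (y, x)

-- aliases = entity_map[u]["aliases"]; if v not in aliases: aliases.append(v)  — first-match dict update
def coB_addToAliases : List (String × List String) → String → List (String × List String)
  | [], _ => []
  | f :: rest, v =>
    if f.1 = "aliases" then (f.1, if v ∈ f.2 then f.2 else f.2 ++ [v]) :: rest
    else f :: coB_addToAliases rest v

def coB_setAlias : List (String × List (String × List String)) → String → String →
    List (String × List (String × List String))
  | [], _, _ => []
  | e :: rest, u, v =>
    if e.1 = u then (e.1, coB_addToAliases e.2 v) :: rest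
    else e :: coB_setAlias rest u v

def co_occurrence_relation_alt (entity_map : List (String × List (String × List String))) (chapters : List (String × String)) : List (String × List (String × List String)) :=
  let keys := entity_map.map (fun e => e.1)
  let seen : PySem.Dict (String × String) Bool :=
    chapters.foldl (fun s c =>
      ((PySem.Str.split? c.2 "\n").getD []).foldl (fun s paragraph =>
        let low := PySem.Str.lower paragraph
        let present := keys.filter (fun k => PySem.Str.isIn k low)
        present.foldl (fun s x =>
          present.foldl (fun s y =>
            if y ≠ x then s.insert (coB_pair x y) true else s) s) s) s) PySem.Dict.empty
  seen.keys.foldl (fun em p =>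
    [(p.1, p.2), (p.2, p.1)].foldl (fun em uv => coB_setAlias em uv.1 uv.2) em) entity_map

-- ===== PRECONDITION & SPEC =====
-- Pre_ requires unique keys in entity_map and in each entity's inner dict (an association list with duplicate
-- keys does not encode a Python dict), and excludes the inputs where A raises KeyError: an entity that
-- co-occurs with another entity in some paragraph but whose inner dict has no "aliases" key.
def Pre_co_occurrence_relation (entity_map : List (String × List (String × List String))) (chapters : List (String × String)) : Prop :=
  (entity_map.map (fun e => e.1)).Nodup ∧
  (∀ e ∈ entity_map, (e.2.map (fun f => f.1)).Nodup) ∧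
  (∀ e ∈ entity_map,
    (∃ e' ∈ entity_map, e'.1 ≠ e.1 ∧ ∃ c ∈ chapters, ∃ p ∈ (PySem.Str.split? c.2 "\n").getD [],
      PySem.Str.isIn e.1 (PySem.Str.lower p) = true ∧ PySem.Str.isIn e'.1 (PySem.Str.lower p) = true) →
    "aliases" ∈ e.2.map (fun f => f.1))
instance (entity_map : List (String × List (String × List String))) (chapters : List (String × String)) : Decidable (Pre_co_occurrence_relation entity_map chapters) := by unfold Pre_co_occurrence_relation; infer_instance

def pvWitness_co_occurrence_relation : (List (String × List (String × List String))) × (List (String × String)) :=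
  ([("anna", [("aliases", [])]), ("bob", [("aliases", [])])], [("ch1", "anna met bob\nthe end")])

def Spec_co_occurrence_relation (entity_map : List (String × List (String × List String))) (chapters : List (String × String)) (out : List (String × List (String × List String))) : Prop := out = co_occurrence_relation_alt entity_map chapters
instance (entity_map : List (String × List (String × List String))) (chapters : List (String × String)) (out : List (String × List (String × List String))) : Decidable (Spec_co_occurrence_relation entity_map chapters out) := by unfold Spec_co_occurrence_relation; infer_instance

-- ===== CLAIM (what is proved, stated in full; the proofs are below) =====
def Claim_equal_co_occurrence_relation : Prop := ∀ (entity_map : List (String × List (String × List String))) (chapters : List (String × String)), Dom_co_occurrence_relation entity_map chapters → Pre_co_occurrence_relation entity_map chapters → Spec_co_occurrence_relation entity_map chapters (co_occurrence_relation entity_map chapters)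

-- ===== LEMMAS AND PROOFS =====

theorem pvWitness_ok : Dom_co_occurrence_relation pvWitness_co_occurrence_relation.1 pvWitness_co_occurrence_relation.2 ∧ Pre_co_occurrence_relation pvWitness_co_occurrence_relation.1 pvWitness_co_occurrence_relation.2 := by
  constructor <;> decide

theorem coB_pair_comm (x y : String) : coB_pair x y = coB_pair y x := by
  unfold coB_pair
  rcases lt_trichotomy x y with h | h | h
  · rw [if_pos h, if_neg (lt_asymm h)]
  · subst h; simp
  · rw [if_neg (lt_asymm h), if_pos h]

-- the unordered-pair key A and B both store
theorem pyPairSorted_eq (x y : String) : pyPairSorted x y = coB_pair x y := by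
  unfold pyPairSorted coB_pair
  rw [PySem.List.sorted_eq_foldl_insertBy]
  rcases lt_trichotomy x y with h | h | h
  · have h1 : ¬ y.toList < x.toList := fun hc => lt_asymm h (String.lt_iff_toList_lt.mpr hc)
    simp [PySem.List.insertBy, h, h1]
  · subst h; simp [PySem.List.insertBy]
  · have h1 : y.toList < x.toList := String.lt_iff_toList_lt.mp h
    simp [PySem.List.insertBy, lt_asymm h, h1]

-- ordered enumeration of the sorted pair keys a single paragraph contributes
def ePairs (pres : List String) : List (String × String) :=
  pres.flatMap (fun x => (pres.filter (fun y => y ≠ x)).map (fun y => coB_pair x y))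

-- all pair keys contributed over all chapters and paragraphs, in processing order
def pairStream (chapters : List (String × String)) (keys : List String) : List (String × String) :=
  chapters.flatMap (fun c => ((PySem.Str.split? c.2 "\n").getD []).flatMap (fun par =>
    ePairs (keys.filter (fun k => PySem.Str.isIn k (PySem.Str.lower par)))))

-- one paragraph of A's counting loops is a fold over that paragraph's pair enumeration
theorem parA (keys : List String) (par : String) (d : PySem.Dict (String × String) Int) :
    keys.foldl (fun d entity_key =>
      if PySem.Str.isIn entity_key (PySem.Str.lower par) = true then
        keys.foldl (fun d other_key =>
          if other_key ≠ entity_key ∧ PySem.Str.isIn other_key (PySem.Str.lower par) = true then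
            let pair := pyPairSorted entity_key other_key
            d.insert pair (d.getD pair 0 + 1)
          else d) d
      else d) d
    = (ePairs (keys.filter (fun k => PySem.Str.isIn k (PySem.Str.lower par)))).foldl
        (fun d p => d.insert p (d.getD p 0 + 1)) d := by
  rw [PySem.List.foldl_if_eq_foldl_filter (fun k => PySem.Str.isIn k (PySem.Str.lower par))]
  rw [ePairs, List.foldl_flatMap]
  apply PySem.List.foldl_congr_mem
  intro acc x _
  have h1 : keys.foldl (fun d other_key =>
        if other_key ≠ x ∧ PySem.Str.isIn other_key (PySem.Str.lower par) = true then
          let pair := pyPairSorted x other_key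
          d.insert pair (d.getD pair 0 + 1)
        else d) acc
      = keys.foldl (fun d other_key =>
        if PySem.Str.isIn other_key (PySem.Str.lower par) = true then
          (if other_key ≠ x then
            (fun d p => d.insert p (d.getD p 0 + 1)) d (pyPairSorted x other_key)
          else d)
        else d) acc := by
    apply PySem.List.foldl_congr_mem
    intro a y _
    by_cases hy : PySem.Str.isIn y (PySem.Str.lower par) = true <;>
      by_cases hne : y ≠ x <;> simp [hy, hne]
  rw [h1, PySem.List.foldl_if_eq_foldl_filter (fun k => PySem.Str.isIn k (PySem.Str.lower par))]
  rw [List.foldl_map, ← PySem.List.foldl_ite_eq_foldl_filter (fun y => y ≠ x)]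
  apply PySem.List.foldl_congr_mem
  intro a y _
  by_cases hne : y ≠ x <;> simp [hne, pyPairSorted_eq]

-- A's counting loops, flattened over chapters and paragraphs
theorem countsA_flat (chapters : List (String × String)) (keys : List String) :
    chapters.foldl (fun d c =>
      ((PySem.Str.split? c.2 "\n").getD []).foldl (fun d paragraph =>
        keys.foldl (fun d entity_key =>
          if PySem.Str.isIn entity_key (PySem.Str.lower paragraph) = true then
            keys.foldl (fun d other_key =>
              if other_key ≠ entity_key ∧ PySem.Str.isIn other_key (PySem.Str.lower paragraph) = true then
                let pair := pyPairSorted entity_key other_key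
                d.insert pair (d.getD pair 0 + 1)
              else d) d
          else d) d) d) (PySem.Dict.empty : PySem.Dict (String × String) Int)
    = (pairStream chapters keys).foldl (fun d p => d.insert p (d.getD p 0 + 1)) PySem.Dict.empty := by
  rw [pairStream, List.foldl_flatMap]
  apply PySem.List.foldl_congr_mem
  intro acc c _
  rw [List.foldl_flatMap]
  apply PySem.List.foldl_congr_mem
  intro a par _
  exact parA keys par a

-- one paragraph of B's marking loops, same enumeration
theorem parB (keys : List String) (par : String) (s : PySem.Dict (String × String) Bool) :
    (keys.filter (fun k => PySem.Str.isIn k (PySem.Str.lower par))).foldl (fun s x =>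
      (keys.filter (fun k => PySem.Str.isIn k (PySem.Str.lower par))).foldl (fun s y =>
        if y ≠ x then s.insert (coB_pair x y) true else s) s) s
    = (ePairs (keys.filter (fun k => PySem.Str.isIn k (PySem.Str.lower par)))).foldl
        (fun s p => s.insert p true) s := by
  rw [ePairs, List.foldl_flatMap]
  apply PySem.List.foldl_congr_mem
  intro acc x _
  rw [List.foldl_map, ← PySem.List.foldl_ite_eq_foldl_filter (fun y => y ≠ x)]

-- B's marking loops, flattened
theorem seenB_flat (chapters : List (String × String)) (keys : List String) :
    chapters.foldl (fun s c =>
      ((PySem.Str.split? c.2 "\n").getD []).foldl (fun s paragraph =>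
        (keys.filter (fun k => PySem.Str.isIn k (PySem.Str.lower paragraph))).foldl (fun s x =>
          (keys.filter (fun k => PySem.Str.isIn k (PySem.Str.lower paragraph))).foldl (fun s y =>
            if y ≠ x then s.insert (coB_pair x y) true else s) s) s) s) (PySem.Dict.empty : PySem.Dict (String × String) Bool)
    = (pairStream chapters keys).foldl (fun s p => s.insert p true) PySem.Dict.empty := by
  rw [pairStream, List.foldl_flatMap]
  apply PySem.List.foldl_congr_mem
  intro acc c _
  rw [List.foldl_flatMap]
  apply PySem.List.foldl_congr_mem
  intro a par _
  exact parB keys par a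

theorem sum_map_add_nat {α : Type} (l : List α) (f g : α → Nat) :
    (l.map (fun x => f x + g x)).sum = (l.map f).sum + (l.map g).sum := by
  induction l with
  | nil => simp
  | cons a t ih => simp [ih]; omega

theorem sum_map_ite_eq_countP {α : Type} (l : List α) (p : α → Bool) :
    (l.map (fun x => if p x then 1 else 0)).sum = l.countP p := by
  induction l with
  | nil => simp
  | cons a t ih => by_cases h : p a <;> simp [List.countP_cons, h, ih] <;> omega

-- a symmetric, diagonal-free double count over one list is even
theorem even_sum_countP (l : List String) (q : String → String → Bool)
    (hs : ∀ x y, q x y = q y x) (hd : ∀ x, q x x = false) :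
    Even ((l.map (fun x => l.countP (q x))).sum) := by
  induction l with
  | nil => simp
  | cons a t ih =>
    simp only [List.map_cons, List.sum_cons, List.countP_cons]
    rw [sum_map_add_nat t (fun x => t.countP (q x)) (fun x => if q x a then 1 else 0)]
    rw [sum_map_ite_eq_countP t (fun x => q x a)]
    have hc : t.countP (fun x => q x a) = t.countP (q a) :=
      List.countP_congr (fun x _ => by rw [hs])
    rw [hc, hd a, if_neg Bool.false_ne_true]
    obtain ⟨m, hm⟩ := ih
    exact ⟨t.countP (q a) + m, by omega⟩

theorem even_count_ePairs (pres : List String) (p : String × String) :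
    Even ((ePairs pres).count p) := by
  rw [ePairs, List.count_flatMap]
  have hcongr : (pres.map ((fun l => List.count p l) ∘ (fun x => (pres.filter (fun y => y ≠ x)).map (fun y => coB_pair x y))))
      = pres.map (fun x => pres.countP (fun y => (coB_pair x y == p) && decide (y ≠ x))) := by
    apply List.map_congr_left
    intro x _
    simp only [Function.comp]
    rw [List.count_eq_countP, List.countP_map, List.countP_filter]
    rfl
  rw [hcongr]
  apply even_sum_countP
  · intro x y
    rw [coB_pair_comm]
    by_cases h : x = y
    · subst h; rfl
    · simp [h, Ne.symm h]
  · intro x; simp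

theorem even_sum_map {α : Type} (l : List α) (f : α → Nat) (h : ∀ x ∈ l, Even (f x)) :
    Even ((l.map f).sum) := by
  induction l with
  | nil => simp
  | cons a t ih =>
    simp only [List.map_cons, List.sum_cons]
    exact (h a (List.mem_cons_self)).add (ih (fun x hx => h x (List.mem_cons_of_mem _ hx)))

theorem even_count_pairStream (chapters : List (String × String)) (keys : List String) (p : String × String) :
    Even ((pairStream chapters keys).count p) := by
  rw [pairStream, List.count_flatMap]
  apply even_sum_map
  intro c _
  simp only [Function.comp]
  rw [List.count_flatMap]
  apply even_sum_map
  intro par _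
  simp only [Function.comp]
  exact even_count_ePairs _ p

-- ===== phase 2: the alias-writing folds agree on unique-key maps =====
def InvEM (em : List (String × List (String × List String))) : Prop :=
  (em.map (fun e => e.1)).Nodup ∧ ∀ e ∈ em, (e.2.map (fun f => f.1)).Nodup

theorem addToAliases_eq (fs : List (String × List String)) (v : String)
    (h : (fs.map (fun f => f.1)).Nodup) :
    fs.map (fun f => if f.1 = "aliases" then (f.1, if v ∈ f.2 then f.2 else f.2 ++ [v]) else f)
    = coB_addToAliases fs v := by
  induction fs with
  | nil => rfl
  | cons f rest ih =>
    rw [List.map_cons, List.nodup_cons] at h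
    obtain ⟨hnm, hnd⟩ := h
    by_cases hf : f.1 = "aliases"
    · simp only [List.map_cons, coB_addToAliases, if_pos hf]
      congr 1
      have hid : ∀ f' ∈ rest, (if f'.1 = "aliases" then (f'.1, if v ∈ f'.2 then f'.2 else f'.2 ++ [v]) else f') = f' := by
        intro f' hm
        rw [if_neg]
        intro hc
        exact hnm (hf ▸ hc ▸ List.mem_map_of_mem hm)
      exact (List.map_congr_left hid).trans (List.map_id rest)
    · simp only [List.map_cons, coB_addToAliases, if_neg hf]
      congr 1
      exact ih hnd

theorem setAlias_eq (em : List (String × List (String × List String))) (k v : String)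
    (h : InvEM em) : coA_addAlias em k v = coB_setAlias em k v := by
  obtain ⟨hk, hin⟩ := h
  induction em with
  | nil => rfl
  | cons e rest ih =>
    rw [List.map_cons, List.nodup_cons] at hk
    obtain ⟨hnm, hnd⟩ := hk
    by_cases he : e.1 = k
    · simp only [coA_addAlias, List.map_cons, coB_setAlias, if_pos he]
      congr 1
      · rw [addToAliases_eq e.2 v (hin e List.mem_cons_self)]
      · have hid : ∀ e' ∈ rest,
            (if e'.1 = k then (e'.1, e'.2.map (fun f => if f.1 = "aliases" then (f.1, if v ∈ f.2 then f.2 else f.2 ++ [v]) else f)) else e') = e' := by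
          intro e' hm
          rw [if_neg]
          intro hc
          exact hnm (he ▸ hc ▸ List.mem_map_of_mem hm)
        exact (List.map_congr_left hid).trans (List.map_id rest)
    · simp only [coA_addAlias, List.map_cons, coB_setAlias, if_neg he]
      congr 1
      exact ih hnd (fun e' hm => hin e' (List.mem_cons_of_mem _ hm))

theorem InvEM_coA (em : List (String × List (String × List String))) (k v : String)
    (h : InvEM em) : InvEM (coA_addAlias em k v) := by
  obtain ⟨hk, hin⟩ := h
  constructor
  · have hkeys : (coA_addAlias em k v).map (fun e => e.1) = em.map (fun e => e.1) := by
      rw [coA_addAlias, List.map_map]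
      apply List.map_congr_left
      intro e _
      by_cases he : e.1 = k <;> simp [Function.comp, he]
    rw [hkeys]; exact hk
  · intro e' he'
    rw [coA_addAlias, List.mem_map] at he'
    obtain ⟨e, hem, rfl⟩ := he'
    by_cases he : e.1 = k
    · rw [if_pos he]
      have : ((e.2.map (fun f => if f.1 = "aliases" then (f.1, if v ∈ f.2 then f.2 else f.2 ++ [v]) else f)).map (fun f => f.1)) = e.2.map (fun f => f.1) := by
        rw [List.map_map]
        apply List.map_congr_left
        intro f _
        by_cases hf : f.1 = "aliases" <;> simp [Function.comp, hf]
      simpa [this] using hin e hem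
    · rw [if_neg he]; exact hin e hem

theorem phase2_fold (ps : List (String × String)) :
    ∀ em, InvEM em →
    ps.foldl (fun em pc => coA_addAlias (coA_addAlias em pc.1 pc.2) pc.2 pc.1) em
    = ps.foldl (fun em p => [(p.1, p.2), (p.2, p.1)].foldl (fun em uv => coB_setAlias em uv.1 uv.2) em) em := by
  induction ps with
  | nil => intro em _; rfl
  | cons p t ih =>
    intro em h
    simp only [List.foldl_cons, List.foldl_nil]
    have h1 := InvEM_coA em p.1 p.2 h
    have step : coA_addAlias (coA_addAlias em p.1 p.2) p.2 p.1
        = coB_setAlias (coB_setAlias em p.1 p.2) p.2 p.1 := by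
      rw [setAlias_eq _ p.2 p.1 h1, setAlias_eq em p.1 p.2 h]
    rw [step]
    exact ih _ (step ▸ InvEM_coA (coA_addAlias em p.1 p.2) p.2 p.1 h1)

-- ===== assembling the claim =====
theorem co_occ_spec_aux (em : List (String × List (String × List String))) (ch : List (String × String))
    (hpre : Pre_co_occurrence_relation em ch) :
    co_occurrence_relation em ch = co_occurrence_relation_alt em ch := by
  obtain ⟨hnd, hinner, -⟩ := hpre
  have hA : co_occurrence_relation em ch
      = (PySem.Set.ofList (pairStream ch (em.map (fun e => e.1)))).foldl
          (fun em' pc => coA_addAlias (coA_addAlias em' pc.1 pc.2) pc.2 pc.1) em := by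
    simp only [co_occurrence_relation]
    rw [countsA_flat]
    set L := pairStream ch (em.map (fun e => e.1)) with hLdef
    set counts := L.foldl (fun d p => d.insert p (d.getD p 0 + 1)) (PySem.Dict.empty : PySem.Dict (String × String) Int) with hcounts
    have hndk : counts.keys.Nodup := by
      rw [hcounts]
      exact PySem.Dict.nodup_keys_foldl_insert L (fun d p => d.getD p 0 + 1) _ PySem.Dict.nodup_keys_empty
    have hkeys : counts.keys = PySem.Set.ofList L := by
      rw [hcounts, PySem.Dict.keys_foldl_insert L (fun d p => d.getD p 0 + 1),
        PySem.Dict.keys_empty, PySem.Set.update_nil_left]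
    have hval : ∀ pc ∈ counts.items, (1 : Int) < pc.2 := by
      intro pc hpc
      have hpc' : (pc.1, pc.2) ∈ counts.items := by simpa using hpc
      have hv : counts.getD pc.1 0 = pc.2 := PySem.Dict.getD_of_mem_items counts hpc' hndk 0
      have hcnt : counts.getD pc.1 0 = (0 : Int) + (L.count pc.1 : Int) := by
        rw [hcounts, PySem.Dict.getD_foldl_insert_add_one, PySem.Dict.getD_empty]
      have hmemL : pc.1 ∈ L := by
        have := PySem.Dict.mem_keys_of_mem_items counts hpc
        rw [hkeys] at this
        exact (PySem.Set.mem_ofList L pc.1).mp this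
      have hpos : 0 < L.count pc.1 := List.count_pos_iff.mpr hmemL
      have hEven := even_count_pairStream ch (em.map (fun e => e.1)) pc.1
      rw [← hLdef] at hEven
      obtain ⟨m, hm⟩ := hEven
      rw [← hv, hcnt]
      omega
    have hguard : counts.items.foldl (fun em' pc =>
          if pc.2 > 1 then coA_addAlias (coA_addAlias em' pc.1.1 pc.1.2) pc.1.2 pc.1.1 else em') em
        = counts.items.foldl (fun em' pc =>
          coA_addAlias (coA_addAlias em' pc.1.1 pc.1.2) pc.1.2 pc.1.1) em := by
      apply PySem.List.foldl_congr_mem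
      intro acc pc hpc
      rw [if_pos (hval pc hpc)]
    rw [hguard]
    have hmapfold : counts.items.foldl (fun em' pc =>
          coA_addAlias (coA_addAlias em' pc.1.1 pc.1.2) pc.1.2 pc.1.1) em
        = (counts.items.map (fun pc => pc.1)).foldl
          (fun em' pc => coA_addAlias (coA_addAlias em' pc.1 pc.2) pc.2 pc.1) em := by
      rw [List.foldl_map]
    rw [hmapfold]
    have hkeys' : counts.items.map (fun pc => pc.1) = PySem.Set.ofList L := by
      rw [show counts.items.map (fun pc => pc.1) = counts.keys from rfl, hkeys]
    rw [hkeys']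
  have hB : co_occurrence_relation_alt em ch
      = (PySem.Set.ofList (pairStream ch (em.map (fun e => e.1)))).foldl
          (fun em' p => [(p.1, p.2), (p.2, p.1)].foldl (fun em'' uv => coB_setAlias em'' uv.1 uv.2) em') em := by
    simp only [co_occurrence_relation_alt]
    rw [seenB_flat]
    have hkeys : (((pairStream ch (em.map (fun e => e.1))).foldl
        (fun s p => s.insert p true) (PySem.Dict.empty : PySem.Dict (String × String) Bool))).keys
        = PySem.Set.ofList (pairStream ch (em.map (fun e => e.1))) := by
      rw [PySem.Dict.keys_foldl_insert _ (fun _ _ => true),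
        PySem.Dict.keys_empty, PySem.Set.update_nil_left]
    rw [hkeys]
  rw [hA, hB]
  exact phase2_fold _ em ⟨hnd, hinner⟩

-- ===== VERDICT (by name: the statement is the Claim_ definition above) =====
theorem co_occurrence_relation_spec : Claim_equal_co_occurrence_relation := by
  intro em ch _ hpre
  unfold Spec_co_occurrence_relation
  exact co_occ_spec_aux em ch hpre
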